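-- pv_equiv track=rewrite | github.com/rafmartom/vim-dan-notes | python/vim_dan_notes/core.py | get_next_buid
-- ===== SOURCE A (Python) =====
-- def get_next_buid(buid):
--     """
--     Given a DAN BUID (0-9, a-z, A-Z), returns the next BUID in sequence.
--     Examples:
--         'l5' -> 'l6'
--         'la' -> 'lb'
--         'lZ' -> 'm0'
--         'ZZ' -> '000' (overflow, adds a digit)
--     """
--     # Define the alphanumeric characters in order
--     alphanumeric = [str(d) for d in range(10)] + [chr(c) for c in range(ord('a'), ord('z')+1)] + [chr(C) for C in range(ord('A'), ord('Z')+1)]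
--     base = len(alphanumeric)
--     char_to_value = {c: i for i, c in enumerate(alphanumeric)}
--
--     # Convert BUID to decimal
--     decimal = 0
--     for char in buid:
--         decimal = decimal * base + char_to_value[char]
--
--     # Increment
--     decimal += 1
--
--     # Convert back to BUID
--     if decimal == 0:
--         return alphanumeric[0]
--
--     next_buid = []
--     while decimal > 0:
--         decimal, remainder = divmod(decimal, base)
--         next_buid.append(alphanumeric[remainder])
--
--     return ''.join(reversed(next_buid))
-- ===== SOURCE B (Python) =====
-- def get_next_buid(buid):
--     """
--     Increment a DAN BUID (0-9, a-z, A-Z) by rightmost-digit carry propagation: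
--     O(n) worst case and O(1) typically, no bignum conversion.
--     Unlike the original, leading zeros are preserved ('05' -> '06', not '6'),
--     which is the intended behaviour for positional IDs (the original docstring itself expects length-preserving output).
--     """
--     chars = list(buid)
--     i = len(chars) - 1
--     while i >= 0:
--         c = chars[i]
--         if c == 'Z':
--             chars[i] = '0'   # wrap around, carry into the next position
--             i -= 1
--         elif c == '9':
--             chars[i] = 'a'
--             return ''.join(chars)
--         elif c == 'z':
--             chars[i] = 'A'
--             return ''.join(chars)
--         else:
--             chars[i] = chr(ord(c) + 1)
--             return ''.join(chars)
--     return '1' + ''.join(chars)   # all positions overflowed: grow by one digit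
-- ===== Notes on version B (the rewrite author's own statement) =====
-- stated objective: faster
-- what changed: A converts the whole ID to a bignum (O(n^2) with the dict build and bignum arithmetic) and re-encodes it; B increments the rightmost character in place and propagates the carry leftwards, O(n) worst case and O(1) typically.
-- intended difference: On BUIDs of length >= 2 that start with '0' and whose remaining characters are not all 'Z', A silently strips the leading zeros (A('05')='6'), while B preserves the ID's length (B('05')='06'), which is the intended behaviour for positional IDs (A's own docstring already expects length-preserving output). — e.g. on get_next_buid("05"): A returns "6", B returns "06"
import Mathlib
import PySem

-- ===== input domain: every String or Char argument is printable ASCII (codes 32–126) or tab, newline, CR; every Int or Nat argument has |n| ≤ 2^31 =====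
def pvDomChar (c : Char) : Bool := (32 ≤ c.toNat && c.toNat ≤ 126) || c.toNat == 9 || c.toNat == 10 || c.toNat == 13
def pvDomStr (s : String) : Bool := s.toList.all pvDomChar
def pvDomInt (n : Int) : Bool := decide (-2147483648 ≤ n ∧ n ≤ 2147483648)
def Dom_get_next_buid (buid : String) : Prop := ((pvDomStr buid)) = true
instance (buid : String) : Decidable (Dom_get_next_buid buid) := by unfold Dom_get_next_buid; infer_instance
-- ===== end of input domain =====

set_option maxRecDepth 7000

-- B replaces A's bignum round-trip (string → big integer → string) by an in-place
-- rightmost-digit increment with carry propagation; B keeps leading zeros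
-- ('05' → '06') where A strips them (the intended difference D_ below).

-- ===== PORT A =====
-- alphanumeric = [str(d) for d in range(10)] + [chr(c) for c in range(97,123)] + [chr(C) for C in range(65,91)];
-- str(d) of one decimal digit d is the character chr(48 + d), and chr is Char.ofNat (exact on this range)
def pvAlphanumeric : List Char :=
  (PySem.List.pyRange 0 10 1).map (fun d => Char.ofNat (48 + d.toNat)) ++
  (PySem.List.pyRange 97 123 1).map (fun c => Char.ofNat c.toNat) ++
  (PySem.List.pyRange 65 91 1).map (fun c => Char.ofNat c.toNat)

-- base = len(alphanumeric)
def pvBase : Int := PySem.List.len pvAlphanumeric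

-- char_to_value = {c: i for i, c in enumerate(alphanumeric)}
def pvCharToValue : PySem.Dict Char Int :=
  (PySem.List.enumerate pvAlphanumeric 0).foldl (fun d p => d.insert p.2 p.1) PySem.Dict.empty

-- while decimal > 0: decimal, remainder = divmod(decimal, base); next_buid.append(alphanumeric[remainder])
def pvBuildLoop (decimal : Int) (next_buid : List Char) : List Char :=
  if h : 0 < decimal then
    pvBuildLoop (PySem.Int.floordiv decimal pvBase)
      (next_buid ++ [PySem.List.pyGetD pvAlphanumeric (PySem.Int.mod decimal pvBase) ' '])
  else next_buid
termination_by decimal.toNat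
decreasing_by
  have hb : pvBase = 62 := by decide
  rw [hb, PySem.Int.floordiv_eq_ediv_of_pos (by norm_num)]
  omega

-- char_to_value[char] raises KeyError outside the alphabet: those inputs are excluded
-- by Pre_, so the getD default is never read
def get_next_buid (buid : String) : String :=
  let decimal : Int :=
    buid.toList.foldl (fun dec ch => dec * pvBase + pvCharToValue.getD ch 0) 0
  let decimal := decimal + 1
  if decimal = 0 then String.ofList [PySem.List.pyGetD pvAlphanumeric 0 ' ']
  else String.ofList (pvBuildLoop decimal []).reverse

-- ===== PORT B =====
-- the three non-carry branches of Source B's loop body ('9' → 'a', 'z' → 'A', else chr(ord+1))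
def pvSucc (c : Char) : Char :=
  if c = '9' then 'a' else if c = 'z' then 'A' else Char.ofNat (c.toNat + 1)

-- Source B's while loop walks chars right-to-left: recursion over the reversed char list;
-- [] = the loop ran off the left end, i.e. the final "return '1' + ''.join(chars)"
def pvCarry : List Char → List Char
  | [] => ['1']
  | c :: rest => if c = 'Z' then '0' :: pvCarry rest else pvSucc c :: rest

def get_next_buid_alt (buid : String) : String :=
  String.ofList (pvCarry buid.toList.reverse).reverse

-- ===== PRECONDITION & SPEC =====
def pvAlnumChars : List Char :=
  "0123456789abcdefghijklmnopqrstuvwxyzABCDEFGHIJKLMNOPQRSTUVWXYZ".toList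

-- A raises KeyError on any character outside [0-9a-zA-Z]; Pre_ admits exactly the strings A returns on
def Pre_get_next_buid (buid : String) : Prop :=
  buid.toList.all (fun c => pvAlnumChars.contains c) = true
instance (buid : String) : Decidable (Pre_get_next_buid buid) := by
  unfold Pre_get_next_buid; infer_instance

def pvWitness_get_next_buid : String := "l5"

-- On BUIDs of length ≥ 2 that start with '0' and whose remaining characters are not all 'Z',
-- A strips the leading zeros (A '05' = "6") while B preserves the ID's length (B '05' = "06"),
-- the intended behaviour for positional IDs (A's own docstring already expects length-preserving output).
def D_get_next_buid (buid : String) : Prop :=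
  2 ≤ buid.toList.length ∧ buid.toList.head? = some '0' ∧ ∃ c ∈ buid.toList.tail, c ≠ 'Z'
instance (buid : String) : Decidable (D_get_next_buid buid) := by
  unfold D_get_next_buid; infer_instance

def Spec_get_next_buid (buid : String) (out : String) : Prop :=
  ¬ D_get_next_buid buid → out = get_next_buid_alt buid
instance (buid : String) (out : String) : Decidable (Spec_get_next_buid buid out) := by
  unfold Spec_get_next_buid; infer_instance

def pvDiffWitness_get_next_buid : String := "05"
def pvDiffWitnessOut_get_next_buid : String × String := ("6", "06")

-- ===== CLAIM (what is proved, stated in full; the proofs are below) =====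
def Claim_unchanged_get_next_buid : Prop :=
  ∀ (buid : String), Dom_get_next_buid buid → Pre_get_next_buid buid →
    Spec_get_next_buid buid (get_next_buid buid)

def Claim_changed_get_next_buid : Prop :=
  Dom_get_next_buid (pvDiffWitness_get_next_buid) ∧
  Pre_get_next_buid (pvDiffWitness_get_next_buid) ∧
  D_get_next_buid (pvDiffWitness_get_next_buid) ∧
  get_next_buid (pvDiffWitness_get_next_buid) = pvDiffWitnessOut_get_next_buid.1 ∧
  get_next_buid_alt (pvDiffWitness_get_next_buid) = pvDiffWitnessOut_get_next_buid.2 ∧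
  pvDiffWitnessOut_get_next_buid.1 ≠ pvDiffWitnessOut_get_next_buid.2

def Claim_exact_get_next_buid : Prop :=
  ∀ (buid : String), Dom_get_next_buid buid → Pre_get_next_buid buid →
    D_get_next_buid buid → get_next_buid buid ≠ get_next_buid_alt buid

-- ===== LEMMAS AND PROOFS =====

-- digit value (index in the alphabet) and A's digit-to-character table lookup
def pvVal (c : Char) : ℕ := pvAlnumChars.idxOf c
def pvChr (n : ℕ) : Char := pvAlphanumeric.getD n ' '

theorem pvAl_eq : pvAlphanumeric = pvAlnumChars := by decide
theorem pvLen : pvAlnumChars.length = 62 := by decide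

theorem pvPre_mem {buid : String} (h : Pre_get_next_buid buid) :
    ∀ c ∈ buid.toList, c ∈ pvAlnumChars := by
  unfold Pre_get_next_buid at h
  intro c hc
  exact List.contains_iff_mem.mp (List.all_eq_true.mp h c hc)

theorem pvVal_lt : ∀ c ∈ pvAlnumChars, pvVal c < 62 := by
  intro c hc
  have h := List.idxOf_lt_length_of_mem hc
  rwa [pvLen] at h

-- getD at the index of a member is the member
theorem pvGetD_idxOf (c : Char) (hc : c ∈ pvAlnumChars) :
    pvAlnumChars.getD (pvAlnumChars.idxOf c) ' ' = c := by
  have h := List.idxOf_lt_length_of_mem hc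
  rw [List.getD_eq_getElem _ _ h]
  exact List.getElem_idxOf h

theorem pvChr_val : ∀ c ∈ pvAlnumChars, pvChr (pvVal c) = c := by
  intro c hc
  unfold pvChr pvVal
  rw [pvAl_eq]
  exact pvGetD_idxOf c hc

theorem pvTable_all :
    (pvAlnumChars.all (fun c => pvCharToValue.getD c 0 == (pvVal c : ℤ))) = true := by decide
theorem pvTable_getD : ∀ c ∈ pvAlnumChars, pvCharToValue.getD c 0 = (pvVal c : ℤ) := by
  intro c hc
  exact eq_of_beq (List.all_eq_true.mp pvTable_all c hc)

-- each alphabet character's successor in the table is pvSucc of it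
theorem pvStep : ∀ k : ℕ, k < 61 →
    pvAlnumChars.getD (k + 1) ' ' = pvSucc (pvAlnumChars.getD k ' ') := by decide

theorem pvSucc_spec : ∀ c ∈ pvAlnumChars, c ≠ 'Z' →
    pvVal c + 1 < 62 ∧ pvChr (pvVal c + 1) = pvSucc c := by
  intro c hc hne
  have h62 : pvVal c < 62 := pvVal_lt c hc
  have hg := pvGetD_idxOf c hc
  have hne61 : pvVal c ≠ 61 := by
    intro h61
    apply hne
    rw [show pvAlnumChars.idxOf c = 61 from h61] at hg
    rw [show pvAlnumChars.getD 61 ' ' = 'Z' by decide] at hg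
    exact hg.symm
  refine ⟨by omega, ?_⟩
  unfold pvChr
  rw [pvAl_eq, pvStep (pvVal c) (by omega)]
  rw [show pvAlnumChars.getD (pvVal c) ' ' = c from hg]

theorem pvVal_eq_zero : ∀ c ∈ pvAlnumChars, pvVal c = 0 → c = '0' := by
  intro c hc h0
  have hg := pvGetD_idxOf c hc
  rw [show pvAlnumChars.idxOf c = 0 from h0] at hg
  rw [show pvAlnumChars.getD 0 ' ' = '0' by decide] at hg
  exact hg.symm

theorem pvChr_eq_zero : ∀ d : ℕ, d < 62 → pvChr d = '0' → d = 0 := by decide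
theorem pvBase_eq : pvBase = 62 := by decide
theorem pvVal_Z : pvVal 'Z' = 61 := by decide
theorem pvChr_zero : pvChr 0 = '0' := by decide
theorem pvChr_one : pvChr 1 = '1' := by decide

-- A's accumulation loop computes the base-62 value (big-endian fold = ofDigits of the reverse)
theorem pvFold_eq (l : List Char) (hmem : ∀ c ∈ l, c ∈ pvAlnumChars) : ∀ (a : ℕ),
    l.foldl (fun dec ch => dec * pvBase + pvCharToValue.getD ch 0) (a : ℤ)
      = ((Nat.ofDigits 62 (l.reverse.map pvVal) + a * 62 ^ l.length : ℕ) : ℤ) := by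
  simp only [pvBase_eq]
  induction l with
  | nil => intro a; simp
  | cons c t ih =>
    intro a
    have hc : c ∈ pvAlnumChars := hmem c (by simp)
    have ht : ∀ x ∈ t, x ∈ pvAlnumChars := fun x hx => hmem x (by simp [hx])
    simp only [List.foldl_cons]
    rw [pvTable_getD c hc]
    have hcast : (a : ℤ) * 62 + (pvVal c : ℤ) = ((a * 62 + pvVal c : ℕ) : ℤ) := by push_cast; ring
    rw [hcast, ih ht (a * 62 + pvVal c)]
    have hr : (c :: t).reverse.map pvVal = t.reverse.map pvVal ++ [pvVal c] := by simp
    rw [hr, Nat.ofDigits_append, Nat.ofDigits_singleton]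
    push_cast
    simp [List.length_cons, pow_succ]
    ring

-- A's output loop produces the base-62 digit characters, least significant first
theorem pvBuildLoop_eq (N : ℕ) : ∀ (acc : List Char),
    pvBuildLoop (N : ℤ) acc = acc ++ (Nat.digits 62 N).map pvChr := by
  induction N using Nat.strong_induction_on with
  | _ N ih =>
    intro acc
    rw [pvBuildLoop]
    by_cases hN : 0 < N
    · rw [dif_pos (by exact_mod_cast hN)]
      have hdiv : PySem.Int.floordiv (N : ℤ) pvBase = ((N / 62 : ℕ) : ℤ) := by
        rw [pvBase_eq, PySem.Int.floordiv_eq_ediv_of_pos (by norm_num)]; omega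
      have hmod : PySem.Int.mod (N : ℤ) pvBase = ((N % 62 : ℕ) : ℤ) := by
        rw [pvBase_eq, PySem.Int.mod_eq_emod_of_pos (by norm_num)]; omega
      rw [hdiv, hmod, PySem.List.pyGetD_natCast]
      rw [ih (N / 62) (Nat.div_lt_self hN (by norm_num))]
      rw [Nat.digits_def' (by norm_num : (1:ℕ) < 62) hN]
      simp [pvChr, List.append_assoc]
    · rw [dif_neg (by exact_mod_cast hN)]
      have hz : N = 0 := by omega
      simp [hz]

-- canonical base-62 digit strings (last digit nonzero) round-trip through ofDigits
theorem pvRoundtrip (l : List Char) (hne : l ≠ []) (hmem : ∀ c ∈ l, c ∈ pvAlnumChars)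
    (hlast : l.getLast? ≠ some '0') :
    Nat.digits 62 (Nat.ofDigits 62 (l.map pvVal)) = l.map pvVal := by
  apply Nat.digits_ofDigits 62 (by norm_num)
  · intro d hd
    rcases List.mem_map.mp hd with ⟨c, hc, rfl⟩
    exact pvVal_lt c (hmem c hc)
  · intro h
    rw [List.getLast_map]
    intro h0
    have hm : l.getLast hne ∈ l := List.getLast_mem hne
    have := pvVal_eq_zero _ (hmem _ hm) h0
    rw [List.getLast?_eq_some_getLast hne] at hlast
    exact hlast (by rw [this])

theorem pvGetLast?_cons {l : List Char} (c : Char) (h : l ≠ []) :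
    (c :: l).getLast? = l.getLast? := by
  obtain ⟨x, xs, rfl⟩ := List.exists_cons_of_ne_nil h
  exact List.getLast?_cons_cons

theorem pvMapChrVal (l : List Char) (h : ∀ x ∈ l, x ∈ pvAlnumChars) :
    (l.map pvVal).map pvChr = l := by
  induction l with
  | nil => rfl
  | cons a s ih =>
    simp only [List.map_cons]
    rw [pvChr_val a (h a (by simp)), ih (fun x hx => h x (by simp [hx]))]

def pvGood (r : List Char) : Prop :=
  r.getLast? ≠ some '0' ∨ ∀ c ∈ r.dropLast, c = 'Z'

-- the carry loop computes the base-62 digits of value + 1 (little-endian view)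
theorem pvCarry_eq (r : List Char) (hmem : ∀ c ∈ r, c ∈ pvAlnumChars) (hg : pvGood r) :
    pvCarry r = (Nat.digits 62 (Nat.ofDigits 62 (r.map pvVal) + 1)).map pvChr := by
  induction r with
  | nil =>
    have h1 : Nat.ofDigits 62 (List.map pvVal []) + 1 = 1 := by simp
    rw [h1, show Nat.digits 62 1 = [1] by decide]
    simp [pvCarry, pvChr_one]
  | cons c rest ih =>
    have hc : c ∈ pvAlnumChars := hmem c (by simp)
    have hrest : ∀ x ∈ rest, x ∈ pvAlnumChars := fun x hx => hmem x (by simp [hx])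
    have hcons : Nat.ofDigits 62 ((c :: rest).map pvVal)
        = pvVal c + 62 * Nat.ofDigits 62 (rest.map pvVal) := by
      simp [Nat.ofDigits_cons]
    by_cases hcZ : c = 'Z'
    · subst hcZ
      have hgood : pvGood rest := by
        cases rest with
        | nil => left; simp
        | cons x xs =>
          rcases hg with h1 | h2
          · left; simpa using h1
          · right; intro y hy; exact h2 y (by simp [List.dropLast_cons₂, hy])
      rw [show pvCarry ('Z' :: rest) = '0' :: pvCarry rest from rfl]
      rw [hcons, pvVal_Z]
      rw [show 61 + 62 * Nat.ofDigits 62 (rest.map pvVal) + 1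
            = 62 * (Nat.ofDigits 62 (rest.map pvVal) + 1) by ring]
      rw [Nat.digits_def' (by norm_num : (1:ℕ) < 62) (by positivity)]
      rw [Nat.mul_mod_right, Nat.mul_div_cancel_left _ (by norm_num : 0 < 62)]
      rw [List.map_cons, pvChr_zero, ih hrest hgood]
    · obtain ⟨hlt, hchr⟩ := pvSucc_spec c hc hcZ
      rw [show pvCarry (c :: rest) = pvSucc c :: rest from by
        simp [pvCarry, if_neg hcZ]]
      rw [hcons]
      rw [show pvVal c + 62 * Nat.ofDigits 62 (rest.map pvVal) + 1
            = (pvVal c + 1) + 62 * Nat.ofDigits 62 (rest.map pvVal) by ring]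
      rw [Nat.digits_def' (by norm_num : (1:ℕ) < 62) (by omega)]
      rw [Nat.add_mul_mod_self_left, Nat.mod_eq_of_lt hlt]
      rw [Nat.add_mul_div_left _ _ (by norm_num : 0 < 62), Nat.div_eq_of_lt hlt, Nat.zero_add]
      rw [List.map_cons, hchr]
      cases hre : rest with
      | nil => simp
      | cons x xs =>
        have hne : rest ≠ [] := by simp [hre]
        rw [← hre]
        have hlast : rest.getLast? ≠ some '0' := by
          rcases hg with h1 | h2
          · rwa [pvGetLast?_cons _ hne] at h1
          · exfalso
            apply hcZ
            apply h2 c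
            obtain ⟨y, ys, hys⟩ := List.exists_cons_of_ne_nil hne
            rw [hys, List.dropLast_cons₂]
            simp
        rw [pvRoundtrip rest hne hrest hlast, pvMapChrVal rest hrest]

-- ¬D_ means the reversed character list is "good": its last char (the BUID's first)
-- is not '0', or everything before it is 'Z'
theorem pvNotD_good (buid : String) (hD : ¬ D_get_next_buid buid) :
    pvGood buid.toList.reverse := by
  unfold D_get_next_buid at hD
  by_cases hlen : 2 ≤ buid.toList.length
  · by_cases hhead : buid.toList.head? = some '0'
    · right
      intro c hc
      rw [List.dropLast_reverse, List.mem_reverse] at hc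
      by_contra hne
      exact hD ⟨hlen, hhead, c, hc, hne⟩
    · left; rwa [List.getLast?_reverse]
  · right
    intro c hc
    rw [List.dropLast_reverse, List.mem_reverse] at hc
    exfalso
    apply hlen
    cases hl : buid.toList with
    | nil => rw [hl] at hc; simp at hc
    | cons x xs =>
      rw [hl] at hc
      simp only [List.tail_cons] at hc
      cases xs with
      | nil => simp at hc
      | cons y ys => show 2 ≤ ys.length + 1 + 1; omega

-- the common shape of A's result under Pre_
theorem pvA_shape (buid : String) (hPre : Pre_get_next_buid buid) :
    get_next_buid buid
      = String.ofList ((Nat.digits 62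
          (Nat.ofDigits 62 (buid.toList.reverse.map pvVal) + 1)).map pvChr).reverse := by
  have hfold := pvFold_eq buid.toList (pvPre_mem hPre) 0
  rw [Nat.cast_zero] at hfold
  simp only [get_next_buid]
  rw [hfold]
  rw [show ((Nat.ofDigits 62 (buid.toList.reverse.map pvVal)
        + 0 * 62 ^ buid.toList.length : ℕ) : ℤ) + 1
      = ((Nat.ofDigits 62 (buid.toList.reverse.map pvVal) + 1 : ℕ) : ℤ) by push_cast; ring]
  rw [if_neg (by
    exact_mod_cast Nat.succ_ne_zero (Nat.ofDigits 62 (List.map pvVal buid.toList.reverse)))]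
  rw [pvBuildLoop_eq, List.nil_append]

theorem pvB_shape (buid : String) :
    get_next_buid_alt buid = String.ofList (pvCarry buid.toList.reverse).reverse := rfl

-- pvCarry never returns []
theorem pvCarry_ne_nil (r : List Char) : pvCarry r ≠ [] := by
  cases r with
  | nil => simp [pvCarry]
  | cons c rest => unfold pvCarry; split <;> simp

-- if some char strictly before the end is not 'Z', the carry never reaches the last char
theorem pvCarry_getLast? (r : List Char) (h : ∃ x ∈ r.dropLast, x ≠ 'Z') :
    (pvCarry r).getLast? = r.getLast? := by
  induction r with
  | nil => simp at h
  | cons c rest ih =>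
    cases hre : rest with
    | nil => subst hre; simp at h
    | cons x xs =>
      subst hre
      have hne : (x :: xs) ≠ ([] : List Char) := by simp
      rw [show pvCarry (c :: x :: xs)
            = if c = 'Z' then '0' :: pvCarry (x :: xs) else pvSucc c :: (x :: xs) from rfl]
      by_cases hcZ : c = 'Z'
      · rw [if_pos hcZ]
        have hrest : ∃ y ∈ (x :: xs).dropLast, y ≠ 'Z' := by
          rcases h with ⟨y, hy, hyne⟩
          rw [List.dropLast_cons₂] at hy
          rcases List.mem_cons.mp hy with rfl | hy
          · exact absurd hcZ hyne
          · exact ⟨y, hy, hyne⟩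
        rw [pvGetLast?_cons _ (pvCarry_ne_nil (x :: xs)), ih hrest,
          pvGetLast?_cons _ hne]
      · rw [if_neg hcZ]
        rw [pvGetLast?_cons _ hne, pvGetLast?_cons _ hne]

-- ===== VERDICT (by name: the statement is the Claim_ definition above) =====
theorem get_next_buid_spec : Claim_unchanged_get_next_buid := by
  intro buid _ hPre hD
  rw [pvA_shape buid hPre, pvB_shape]
  have hmem : ∀ c ∈ buid.toList.reverse, c ∈ pvAlnumChars :=
    fun c hc => pvPre_mem hPre c (List.mem_reverse.mp hc)
  rw [pvCarry_eq buid.toList.reverse hmem (pvNotD_good buid hD)]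

theorem get_next_buid_changed : Claim_changed_get_next_buid := by
  unfold Claim_changed_get_next_buid pvDiffWitness_get_next_buid pvDiffWitnessOut_get_next_buid
  refine ⟨by decide, by decide, ⟨by decide, by decide, ⟨'5', by decide, by decide⟩⟩,
    ?_, by decide, by decide⟩
  rw [pvA_shape _ (by decide)]
  rw [show Nat.ofDigits 62 (("05".toList).reverse.map pvVal) + 1 = 6 by decide]
  rw [show Nat.digits 62 6 = [6] by decide]
  decide

theorem get_next_buid_tight : Claim_exact_get_next_buid := by
  intro buid _ hPre hD heq
  obtain ⟨hlen, hhead, c, hc, hcne⟩ := hD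
  rw [pvA_shape buid hPre, pvB_shape] at heq
  have hlists : ((Nat.digits 62
      (Nat.ofDigits 62 (buid.toList.reverse.map pvVal) + 1)).map pvChr)
      = pvCarry buid.toList.reverse := by
    have h2 := congrArg String.toList heq
    rw [String.toList_ofList, String.toList_ofList] at h2
    exact List.reverse_inj.mp h2
  have hNne : Nat.ofDigits 62 (buid.toList.reverse.map pvVal) + 1 ≠ 0 := Nat.succ_ne_zero _
  have hdne : Nat.digits 62 (Nat.ofDigits 62 (buid.toList.reverse.map pvVal) + 1) ≠ [] :=
    Nat.digits_ne_nil_iff_ne_zero.mpr hNne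
  -- last element of A's digit-character list is its leading digit, which is not '0' …
  have hlastA : ((Nat.digits 62
      (Nat.ofDigits 62 (buid.toList.reverse.map pvVal) + 1)).map pvChr).getLast?
      = some (pvChr ((Nat.digits 62
          (Nat.ofDigits 62 (buid.toList.reverse.map pvVal) + 1)).getLast hdne)) := by
    rw [List.getLast?_map, List.getLast?_eq_some_getLast hdne]
    rfl
  -- … but the last element of B's list is buid's first char, which is '0'
  have hdrop : ∃ x ∈ buid.toList.reverse.dropLast, x ≠ 'Z' := by
    refine ⟨c, ?_, hcne⟩
    rw [List.dropLast_reverse, List.mem_reverse]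
    exact hc
  have hlastB : (pvCarry buid.toList.reverse).getLast? = some '0' := by
    rw [pvCarry_getLast? _ hdrop, List.getLast?_reverse, hhead]
  rw [hlists, hlastB] at hlastA
  have hchr0 : pvChr ((Nat.digits 62
      (Nat.ofDigits 62 (buid.toList.reverse.map pvVal) + 1)).getLast hdne) = '0' :=
    (Option.some.inj hlastA).symm
  have hlt : (Nat.digits 62
      (Nat.ofDigits 62 (buid.toList.reverse.map pvVal) + 1)).getLast hdne < 62 :=
    Nat.digits_lt_base (by norm_num) (List.getLast_mem hdne)
  exact Nat.getLast_digit_ne_zero 62 hNne (pvChr_eq_zero _ hlt hchr0)
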